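-- pv_equiv track=rewrite | github.com/KsyntaxC/PRACTICA_GENERAL_2 | 9_Cadenas_python/Ejercicio5.py | sac_pal
-- ===== SOURCE A (Python) =====
-- def sac_pal(b,k):
--     b=b+" "; c=0; w=""; v=""; lc=len(b)
--     for i in range(1,lc+1):
--         y=b[i-1:i]
--         if y==" ":
--             c=c+1
--             if c==k:
--                 w=v
--             v=""
--         else:
--             v=v+y
--     return (w)
-- ===== SOURCE B (Python) =====
-- def sac_pal(b, k):
--     parts = b.split(" ")
--     return parts[k - 1] if 1 <= k <= len(parts) else ""
-- ===== Notes on version B (the rewrite author's own statement) =====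
-- stated objective: simpler
-- what changed: Replaces A's character-by-character slicing loop with counter/accumulator state by a single split(" ") followed by a bounds-checked direct index parts[k-1], defaulting to "".
import Mathlib
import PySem

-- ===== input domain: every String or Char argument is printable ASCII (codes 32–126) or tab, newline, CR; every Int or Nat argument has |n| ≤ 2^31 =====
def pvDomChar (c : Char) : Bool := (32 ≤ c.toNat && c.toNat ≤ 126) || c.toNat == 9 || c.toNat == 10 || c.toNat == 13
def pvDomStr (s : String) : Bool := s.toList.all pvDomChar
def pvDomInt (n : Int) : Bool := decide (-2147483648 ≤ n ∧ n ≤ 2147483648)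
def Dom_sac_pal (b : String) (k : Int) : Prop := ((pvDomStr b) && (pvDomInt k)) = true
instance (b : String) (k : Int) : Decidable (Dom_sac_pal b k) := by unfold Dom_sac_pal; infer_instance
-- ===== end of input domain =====

-- B replaces A's char-by-char slicing loop (counter + word accumulator) by split(" ") plus a
-- bounds-checked direct index parts[k-1], defaulting to "".

-- ===== PORT A =====
-- one iteration of A's loop body, given the already-computed slice y = b[i-1:i] (as a char list)
def sacStep (k : Int) (st : Int × List Char × List Char) (y : List Char) :
    Int × List Char × List Char :=
  if y = [' '] then
    (st.1 + 1, if st.1 + 1 = k then st.2.2 else st.2.1, [])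
  else
    (st.1, st.2.1, st.2.2 ++ y)

def sac_pal (b : String) (k : Int) : String :=
  let bc := b.toList ++ [' ']                       -- b = b + " "
  let lc : Int := PySem.Chars.len bc                -- lc = len(b)
  let st := (PySem.List.pyRange 1 (lc + 1) 1).foldl -- for i in range(1, lc+1)
      (fun st i => sacStep k st (PySem.Chars.slice bc (some (i - 1)) (some i)))  -- y = b[i-1:i]
      (0, [], [])                                   -- c=0; w=""; v=""
  String.mk st.2.1                                  -- return w

-- ===== PORT B =====
def sac_pal_alt (b : String) (k : Int) : String :=
  let parts := PySem.Chars.splitOn b.toList [' ']   -- parts = b.split(" ")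
  if 1 ≤ k ∧ k ≤ (parts.length : Int) then
    String.mk ((PySem.List.pyGet? parts (k - 1)).getD [])  -- parts[k-1]; in range by the guard
  else ""

-- ===== PRECONDITION & SPEC =====
def Spec_sac_pal (b : String) (k : Int) (out : String) : Prop := out = sac_pal_alt b k
instance (b : String) (k : Int) (out : String) : Decidable (Spec_sac_pal b k out) := by
  unfold Spec_sac_pal; infer_instance

-- ===== CLAIM (what is proved, stated in full; the proofs are below) =====
def Claim_equal_sac_pal : Prop := ∀ (b : String) (k : Int), Dom_sac_pal b k → Spec_sac_pal b k (sac_pal b k)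

-- ===== LEMMAS AND PROOFS =====

-- reference single-space splitter (structural version of split(" "))
def spWords : List Char → List (List Char)
  | [] => [[]]
  | c :: rest =>
    if c = ' ' then [] :: spWords rest
    else match spWords rest with
      | [] => [[c]]
      | p :: ps => (c :: p) :: ps

-- prepend `pre` to the first word
def headCons (pre : List Char) : List (List Char) → List (List Char)
  | [] => [pre]
  | p :: ps => (pre ++ p) :: ps

theorem spWords_ne_nil (l : List Char) : spWords l ≠ [] := by
  cases l with
  | nil => simp [spWords]
  | cons c rest =>
    simp only [spWords]
    split_ifs
    · simp
    · cases h : spWords rest <;> simp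

theorem headCons_nil_of_ne (ps : List (List Char)) (h : ps ≠ []) : headCons [] ps = ps := by
  cases ps with
  | nil => exact absurd rfl h
  | cons p ps => simp [headCons]

theorem headCons_headCons (a b : List Char) (ps : List (List Char)) :
    headCons a (headCons b ps) = headCons (a ++ b) ps := by
  cases ps <;> simp [headCons]

theorem spWords_cons_of_ne (c : Char) (rest : List Char) (h : c ≠ ' ') :
    spWords (c :: rest) = headCons [c] (spWords rest) := by
  simp only [spWords, if_neg h]
  cases hr : spWords rest <;> simp [headCons]

-- the fuel-based splitOn.go computed by spWords
theorem splitOn_go_eq (fuel : Nat) : ∀ (l cur acc : _), l.length ≤ fuel →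
    PySem.Chars.splitOn.go [' '] fuel l cur acc = acc.reverse ++ headCons cur.reverse (spWords l) := by
  induction fuel with
  | zero =>
    intro l cur acc h
    have hl : l = [] := List.eq_nil_of_length_eq_zero (Nat.le_zero.mp h)
    subst hl
    simp [PySem.Chars.splitOn.go, spWords, headCons]
  | succ f ih =>
    intro l cur acc h
    cases l with
    | nil => simp [PySem.Chars.splitOn.go, spWords, headCons]
    | cons c rest =>
      by_cases hc : c = ' '
      · subst hc
        have hpre : ([' '] : List Char).isPrefixOf (' ' :: rest) = true := by
          simp [List.isPrefixOf]
        rw [PySem.Chars.splitOn.go]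
        simp only [hpre, if_true, List.drop_succ_cons, List.length_nil, List.drop_zero,
          List.length_cons] at *
        rw [ih rest [] (cur.reverse :: acc) (by omega), List.reverse_nil,
          headCons_nil_of_ne _ (spWords_ne_nil rest)]
        simp [spWords, headCons]
      · have hpre : ([' '] : List Char).isPrefixOf (c :: rest) = false := by
          simp [List.isPrefixOf]
          intro hx
          exact absurd hx.symm hc
        rw [PySem.Chars.splitOn.go]
        simp only [hpre, Bool.false_eq_true, if_false]
        rw [ih rest (c :: cur) acc (by simpa using Nat.lt_succ_iff.mp (by simpa using h))]
        rw [spWords_cons_of_ne c rest hc, headCons_headCons]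
        simp

theorem splitOn_eq_spWords (l : List Char) :
    PySem.Chars.splitOn l [' '] = spWords l := by
  show PySem.Chars.splitOn.go [' '] (l.length + 1) l [] [] = spWords l
  rw [splitOn_go_eq (l.length + 1) l [] [] (by omega)]
  simp [headCons_nil_of_ne _ (spWords_ne_nil l)]

-- B-side reference loop: scan the word list with a 1-based counter
def gWord (k : Int) : List (List Char) → Int → List Char → List Char
  | [], _, w => w
  | p :: ps, c, w => gWord k ps (c + 1) (if c + 1 = k then p else w)

-- A's char loop over cs ++ [' '] computes gWord over the words of cs (with v glued onto the first)
theorem foldA (k : Int) : ∀ (cs : List Char) (c : Int) (w v : List Char),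
    ((cs ++ [' ']).foldl (fun st y => sacStep k st [y]) (c, w, v)).2.1
      = gWord k (headCons v (spWords cs)) c w := by
  intro cs
  induction cs with
  | nil =>
    intro c w v
    simp [sacStep, spWords, headCons, gWord]
  | cons a rest ih =>
    intro c w v
    by_cases ha : a = ' '
    · subst ha
      simp only [List.cons_append, List.foldl_cons]
      have hs : sacStep k (c, w, v) [' '] = (c + 1, if c + 1 = k then v else w, []) := by
        simp [sacStep]
      rw [hs, ih]
      rw [headCons_nil_of_ne _ (spWords_ne_nil rest)]
      simp [spWords, headCons, gWord]
    · simp only [List.cons_append, List.foldl_cons]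
      have hs : sacStep k (c, w, v) [a] = (c, w, v ++ [a]) := by
        simp [sacStep, ha]
      rw [hs, ih]
      rw [spWords_cons_of_ne a rest ha, headCons_headCons]

-- A's pyRange-with-slice loop is the structural char fold
theorem foldSlice (k : Int) (bc : List Char) : ∀ (n j : Nat), bc.length - j = n → j ≤ bc.length →
    ∀ (st : Int × List Char × List Char),
    (PySem.List.pyRange ((j : Int) + 1) ((bc.length : Int) + 1) 1).foldl
        (fun st i => sacStep k st (PySem.Chars.slice bc (some (i - 1)) (some i))) st
      = (bc.drop j).foldl (fun st y => sacStep k st [y]) st := by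
  intro n
  induction n with
  | zero =>
    intro j hn hj st
    have hj' : j = bc.length := by omega
    subst hj'
    rw [PySem.List.pyRange_one_eq_nil (by omega)]
    simp
  | succ m ih =>
    intro j hn hj st
    have hjlt : j < bc.length := by omega
    rw [PySem.List.pyRange_one_cons (by exact_mod_cast by omega)]
    simp only [List.foldl_cons]
    have hy : PySem.Chars.slice bc (some ((j : Int) + 1 - 1)) (some ((j : Int) + 1)) = [bc[j]] := by
      have h1 : ((j : Int) + 1 - 1) = ((j : Nat) : Int) := by omega
      have h2 : ((j : Int) + 1) = (((j + 1 : Nat)) : Int) := by omega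
      rw [h1, h2, PySem.Chars.slice_eq_listSlice, PySem.List.slice_natCast,
        List.drop_eq_getElem_cons hjlt, Nat.add_sub_cancel_left]
      rfl
    rw [hy]
    have harg : ((j : Int) + 1 + 1) = (((j + 1 : Nat)) : Int) + 1 := by push_cast; ring
    rw [harg, ih (j + 1) (by omega) (by omega)]
    conv_rhs => rw [List.drop_eq_getElem_cons hjlt]
    rw [List.foldl_cons]

-- gWord closed form: the (k - c)-th remaining word, else the stored w
theorem gWord_char (k : Int) : ∀ (ps : List (List Char)) (c : Int) (w : List Char),
    gWord k ps c w = if c < k ∧ k ≤ c + ps.length then ps.getD (k - c - 1).toNat [] else w := by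
  intro ps
  induction ps with
  | nil =>
    intro c w
    simp only [gWord, List.length_nil]
    rw [if_neg (by omega)]
  | cons p ps ih =>
    intro c w
    simp only [gWord, List.length_cons]
    rw [ih]
    by_cases hk : c + 1 = k
    · rw [if_neg (show ¬(c + 1 < k ∧ k ≤ c + 1 + (ps.length : Int)) by omega), if_pos hk,
        if_pos (show c < k ∧ k ≤ c + (((ps.length + 1 : Nat)) : Int) by push_cast; omega)]
      have h3 : (k - c - 1).toNat = 0 := by omega
      simp [h3]
    · by_cases hin : c + 1 < k ∧ k ≤ c + 1 + (ps.length : Int)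
      · rw [if_pos hin,
          if_pos (show c < k ∧ k ≤ c + (((ps.length + 1 : Nat)) : Int) by push_cast; omega)]
        have h3 : (k - c - 1).toNat = (k - (c + 1) - 1).toNat + 1 := by omega
        simp [h3]
      · rw [if_neg hin, if_neg hk,
          if_neg (show ¬(c < k ∧ k ≤ c + (((ps.length + 1 : Nat)) : Int)) by push_cast; omega)]

-- ===== VERDICT (by name: the statement is the Claim_ definition above) =====
theorem sac_pal_spec : Claim_equal_sac_pal := by
  intro b k _
  show sac_pal b k = sac_pal_alt b k
  unfold sac_pal sac_pal_alt
  simp only [PySem.Chars.len_eq, splitOn_eq_spWords]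
  have hf := foldSlice k (b.toList ++ [' ']) ((b.toList ++ [' ']).length) 0 (by omega) (by omega)
    ((0 : Int), ([] : List Char), ([] : List Char))
  simp only [Nat.cast_zero, zero_add, List.drop_zero] at hf
  rw [hf, foldA k b.toList 0 [] [], headCons_nil_of_ne _ (spWords_ne_nil b.toList), gWord_char]
  by_cases hin : 1 ≤ k ∧ k ≤ ((spWords b.toList).length : Int)
  · rw [if_pos (by omega), if_pos hin]
    have hlt : (k - 1).toNat < (spWords b.toList).length := by omega
    rw [show k - 1 = (((k - 1).toNat : Nat) : Int) from by omega, PySem.List.pyGet?_natCast,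
      List.getElem?_eq_getElem hlt]
    have h0 : (k - 0 - 1).toNat = (k - 1).toNat := by omega
    rw [h0, List.getD_eq_getElem _ _ hlt]
    rfl
  · rw [if_neg (by omega), if_neg hin]
    rfl
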